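-- pv_equiv track=rewrite | github.com/xpakx/aoc | 2024_everybody_codes/quest3.py | step
-- ===== SOURCE A (Python) =====
-- dirs = [(-1, 0), (1, 0), (0, -1), (0, 1)]
--
-- def check_neighbors(cells, i, j, nums, dirs):
--     for dir in dirs:
--         i2 = i + dir[0]
--         j2 = j + dir[1]
--         if i2 < 0 or j2 < 0:
--             return False
--         if i2 >= len(cells) or j2 >= len(cells[i2]):
--             return False
--         if cells[i2][j2] != nums:
--             return False
--     return True
--
-- def step(data, num, dirs=dirs):
--     cells = [row for row in data]
--     to_increase = []
--     for i, row in enumerate(cells):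
--         for j, cell in enumerate(row):
--             if cell == 0:
--                 continue
--             if check_neighbors(cells, i, j, num, dirs):
--                 to_increase.append((i, j))
--     for i, j in to_increase:
--         cells[i][j] += 1
--     return len(to_increase)
-- ===== SOURCE B (Python) =====
-- dirs = [(-1, 0), (1, 0), (0, -1), (0, 1)]
--
-- def step(data, num, dirs=dirs):
--     cells = [row for row in data]
--     # scatter: every cell equal to num votes for each in-bounds neighbor
--     counts = {}
--     for i2, row in enumerate(cells):
--         for j2, cell in enumerate(row):
--             if cell == num:
--                 for di, dj in dirs:
--                     i = i2 - di
--                     j = j2 - dj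
--                     if 0 <= i < len(cells) and 0 <= j < len(cells[i]):
--                         counts[(i, j)] = counts.get((i, j), 0) + 1
--     to_increase = [(i, j)
--                    for i, row in enumerate(cells)
--                    for j, cell in enumerate(row)
--                    if cell != 0 and counts.get((i, j), 0) == len(dirs)]
--     for i, j in to_increase:
--         cells[i][j] += 1
--     return len(to_increase)
-- ===== Notes on version B (the rewrite author's own statement) =====
-- stated objective: alternative
-- what changed: A probes, for every nonzero cell, all len(dirs) neighbors with an early-exit bounds-and-value check; B instead makes one scatter pass in which every cell equal to num votes for its in-bounds neighbors in a counter dict, and a cell qualifies iff it is nonzero and its vote count equals len(dirs).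
import Mathlib
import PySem

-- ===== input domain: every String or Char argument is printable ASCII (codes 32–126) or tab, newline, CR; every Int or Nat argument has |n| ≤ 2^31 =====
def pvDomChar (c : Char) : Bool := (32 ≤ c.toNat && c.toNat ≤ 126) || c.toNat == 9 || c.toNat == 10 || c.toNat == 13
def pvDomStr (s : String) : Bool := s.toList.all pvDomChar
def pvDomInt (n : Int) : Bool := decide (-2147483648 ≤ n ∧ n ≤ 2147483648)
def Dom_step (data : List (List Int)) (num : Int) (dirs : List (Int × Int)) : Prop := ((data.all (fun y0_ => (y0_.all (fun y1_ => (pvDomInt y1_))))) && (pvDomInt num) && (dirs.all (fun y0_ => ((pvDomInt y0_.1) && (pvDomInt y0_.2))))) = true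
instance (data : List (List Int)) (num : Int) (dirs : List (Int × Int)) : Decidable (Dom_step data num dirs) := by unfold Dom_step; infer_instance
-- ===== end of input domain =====

-- B replaces A's per-cell gather (probe all `dirs` neighbors of every nonzero cell) by a one-pass
-- scatter (every cell equal to `num` votes for its in-bounds neighbors in a counter dict); a cell
-- qualifies iff nonzero and its vote count equals len(dirs).  Both Pythons mutate the rows of
-- `data` identically (the deferred increment); the equivalence proved here is about the return value.

-- ===== PORT A =====
def checkNeighbors (cells : List (List Int)) (i j : Int) (nums : Int) (dirs : List (Int × Int)) : Bool :=
  match dirs with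
  | [] => true
  | d :: rest =>
    let i2 := i + d.1
    let j2 := j + d.2
    if i2 < 0 ∨ j2 < 0 then false
    else if i2 ≥ (cells.length : Int) ∨ j2 ≥ ((PySem.List.pyGetD cells i2 []).length : Int) then false
    else if PySem.List.pyGetD (PySem.List.pyGetD cells i2 []) j2 0 ≠ nums then false
    else checkNeighbors cells i j nums rest

def step (data : List (List Int)) (num : Int) (dirs : List (Int × Int)) : Int :=
  let cells := data
  let toIncrease : List (Int × Int) :=
    (PySem.List.enumerate cells).foldl (fun acc p =>
      (PySem.List.enumerate p.2).foldl (fun acc2 q =>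
        if q.2 = 0 then acc2
        else if checkNeighbors cells p.1 q.1 num dirs then acc2 ++ [(p.1, q.1)] else acc2) acc) []
  (toIncrease.length : Int)

-- ===== PORT B =====
def step_alt (data : List (List Int)) (num : Int) (dirs : List (Int × Int)) : Int :=
  let cells := data
  let counts : PySem.Dict (Int × Int) Int :=
    (PySem.List.enumerate cells).foldl (fun c p =>
      (PySem.List.enumerate p.2).foldl (fun c2 q =>
        if q.2 = num then
          dirs.foldl (fun c3 d =>
            let i := p.1 - d.1
            let j := q.1 - d.2
            if 0 ≤ i ∧ i < (cells.length : Int) ∧ 0 ≤ j ∧ j < ((PySem.List.pyGetD cells i []).length : Int) then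
              c3.insert (i, j) (c3.getD (i, j) 0 + 1)
            else c3) c2
        else c2) c) PySem.Dict.empty
  let toIncrease : List (Int × Int) :=
    (PySem.List.enumerate cells).flatMap (fun p =>
      ((PySem.List.enumerate p.2).filter (fun q =>
        decide (q.2 ≠ (0:Int) ∧ counts.getD (p.1, q.1) (0:Int) = (dirs.length : Int)))).map (fun q => (p.1, q.1)))
  (toIncrease.length : Int)

-- ===== PRECONDITION & SPEC =====
def Spec_step (data : List (List Int)) (num : Int) (dirs : List (Int × Int)) (out : Int) : Prop := out = step_alt data num dirs
instance (data : List (List Int)) (num : Int) (dirs : List (Int × Int)) (out : Int) : Decidable (Spec_step data num dirs out) := by unfold Spec_step; infer_instance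

-- ===== CLAIM (what is proved, stated in full; the proofs are below) =====
def Claim_equal_step : Prop := ∀ (data : List (List Int)) (num : Int) (dirs : List (Int × Int)), Dom_step data num dirs → Spec_step data num dirs (step data num dirs)

-- ===== LEMMAS AND PROOFS =====

-- neighbor (i+d.1, j+d.2)-style in-bounds test, as A and B both write it
abbrev pvInb (data : List (List Int)) (i j : Int) : Prop :=
  0 ≤ i ∧ i < (data.length : Int) ∧ 0 ≤ j ∧ j < ((PySem.List.pyGetD data i []).length : Int)

-- "direction d passes A's check from cell (i,j)"
abbrev pvOk (data : List (List Int)) (num : Int) (i j : Int) (d : Int × Int) : Prop :=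
  pvInb data (i + d.1) (j + d.2) ∧
    PySem.List.pyGetD (PySem.List.pyGetD data (i + d.1) []) (j + d.2) 0 = num

-- the multiset of scatter targets B's counter counts
def pvTargets (data : List (List Int)) (num : Int) (dirs : List (Int × Int)) : List (Int × Int) :=
  (PySem.List.enumerate data).flatMap (fun p =>
    (PySem.List.enumerate p.2).flatMap (fun q =>
      if q.2 = num then
        (dirs.filter (fun d => decide (pvInb data (p.1 - d.1) (q.1 - d.2)))).map
          (fun d => (p.1 - d.1, q.1 - d.2))
      else []))

lemma pv_check_iff (data : List (List Int)) (num : Int) (i j : Int) (dirs : List (Int × Int)) :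
    checkNeighbors data i j num dirs = true ↔ ∀ d ∈ dirs, pvOk data num i j d := by
  induction dirs with
  | nil => simp [checkNeighbors]
  | cons d rest ih =>
    simp only [checkNeighbors, List.mem_cons, forall_eq_or_imp]
    split_ifs with h1 h2 h3
    · simp only [false_iff]
      rintro ⟨⟨⟨ha, hb, hc, hd⟩, -⟩, -⟩
      omega
    · simp only [false_iff]
      rintro ⟨⟨⟨ha, hb, hc, hd⟩, -⟩, -⟩
      omega
    · simp only [false_iff]
      rintro ⟨⟨-, hv⟩, -⟩
      exact h3 hv
    · rw [ih]
      constructor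
      · intro hr
        refine ⟨⟨⟨?_, ?_, ?_, ?_⟩, not_not.mp h3⟩, hr⟩ <;> omega
      · exact fun h => h.2

lemma pv_counts_eq_counter (data : List (List Int)) (num : Int) (dirs : List (Int × Int)) :
    ((PySem.List.enumerate data).foldl (fun c p =>
      (PySem.List.enumerate p.2).foldl (fun c2 q =>
        if q.2 = num then
          dirs.foldl (fun c3 d =>
            let i := p.1 - d.1
            let j := q.1 - d.2
            if 0 ≤ i ∧ i < (data.length : Int) ∧ 0 ≤ j ∧ j < ((PySem.List.pyGetD data i []).length : Int) then
              c3.insert (i, j) (c3.getD (i, j) 0 + 1)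
            else c3) c2
        else c2) c) (PySem.Dict.empty : PySem.Dict (Int × Int) Int)) =
    (pvTargets data num dirs).foldl (fun c t => c.insert t (c.getD t 0 + 1)) PySem.Dict.empty := by
  rw [pvTargets, List.foldl_flatMap]
  apply PySem.List.foldl_congr_mem
  intro c p _
  rw [List.foldl_flatMap]
  apply PySem.List.foldl_congr_mem
  intro c2 q _
  by_cases hnum : q.2 = num
  · simp only [if_pos hnum]
    rw [List.foldl_map, ← PySem.List.foldl_ite_eq_foldl_filter]
  · simp [hnum]

lemma pv_enum_sum_zero {α : Type} (xs : List α) (s : Int) (f : Int × α → Nat)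
    (h : ∀ p ∈ PySem.List.enumerate xs s, f p = 0) :
    ((PySem.List.enumerate xs s).map f).sum = 0 := by
  apply List.sum_eq_zero
  intro x hx
  rcases List.mem_map.mp hx with ⟨p, hp, rfl⟩
  exact h p hp

lemma pv_enum_sum_single {α : Type} (xs : List α) (s : Int) (f : Int × α → Nat) (k : Nat)
    (hk : k < xs.length)
    (h0 : ∀ (m : Nat) (hm : m < xs.length), m ≠ k → f (s + m, xs[m]) = 0) :
    ((PySem.List.enumerate xs s).map f).sum = f (s + k, xs[k]) := by
  induction xs generalizing s k with
  | nil => simp at hk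
  | cons x t ih =>
    rw [PySem.List.enumerate_cons, List.map_cons, List.sum_cons]
    cases k with
    | zero =>
      have hz : ((PySem.List.enumerate t (s + 1)).map f).sum = 0 := by
        apply pv_enum_sum_zero
        intro p hp
        rcases (PySem.List.mem_enumerate_iff t (s + 1) p).mp hp with ⟨m, hm, rfl⟩
        have hm' : m + 1 < (x :: t).length := by simpa using Nat.succ_lt_succ hm
        have := h0 (m + 1) hm' (by omega)
        have harg : (s + 1 + (m : Int), t[m]) = (s + ((m + 1 : Nat) : Int), (x :: t)[m + 1]) := by
          simp only [List.getElem_cons_succ, Prod.mk.injEq]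
          refine ⟨by push_cast; ring, trivial⟩
        rw [harg]
        exact this
      simp [hz]
    | succ k' =>
      have hx0 : f (s, x) = 0 := by
        have := h0 0 (by omega) (by omega)
        simpa using this
      have hk' : k' < t.length := by simpa using Nat.lt_of_succ_lt_succ hk
      rw [hx0, Nat.zero_add, ih (s + 1) k' hk' ?_]
      · congr 1
        simp only [List.getElem_cons_succ, Prod.mk.injEq]
        refine ⟨by push_cast; ring, trivial⟩
      · intro m hm hne
        have hm' : m + 1 < (x :: t).length := by simpa using Nat.succ_lt_succ hm
        have := h0 (m + 1) hm' (by omega)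
        have harg : (s + 1 + (m : Int), t[m]) = (s + ((m + 1 : Nat) : Int), (x :: t)[m + 1]) := by
          simp only [List.getElem_cons_succ, Prod.mk.injEq]
          refine ⟨by push_cast; ring, trivial⟩
        rw [harg]
        exact this

lemma pv_T (data : List (List Int)) (num : Int) (i0 j0 : Nat) (d : Int × Int) :
    ((PySem.List.enumerate data).map (fun p =>
      ((PySem.List.enumerate p.2).map (fun q =>
        if q.2 = num ∧ p.1 = (i0 : Int) + d.1 ∧ q.1 = (j0 : Int) + d.2 then 1 else 0)).sum)).sum
    = if pvOk data num (i0 : Int) (j0 : Int) d then 1 else 0 := by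
  by_cases hI : 0 ≤ (i0 : Int) + d.1 ∧ (i0 : Int) + d.1 < (data.length : Int)
  · have haI : (((((i0 : Int) + d.1).toNat : Nat)) : Int) = (i0 : Int) + d.1 :=
      Int.toNat_of_nonneg hI.1
    set a : Nat := ((i0 : Int) + d.1).toNat with hadef
    have halen : a < data.length := by omega
    refine Eq.trans (pv_enum_sum_single data 0
      (fun p => ((PySem.List.enumerate p.2).map (fun q =>
        if q.2 = num ∧ p.1 = (i0 : Int) + d.1 ∧ q.1 = (j0 : Int) + d.2 then 1 else 0)).sum)
      a halen ?_) ?_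
    · intro m hm hne
      refine pv_enum_sum_zero _ _ _ ?_
      intro q hq
      rw [if_neg]
      rintro ⟨-, hA, -⟩
      simp only [zero_add] at hA
      omega
    · have hrow : PySem.List.pyGetD data ((i0 : Int) + d.1) [] = data[a] := by
        rw [← haI, PySem.List.pyGetD_natCast, List.getD_eq_getElem data [] halen]
      by_cases hJ : 0 ≤ (j0 : Int) + d.2 ∧ (j0 : Int) + d.2 < ((data[a].length : Nat) : Int)
      · have hbJ : (((((j0 : Int) + d.2).toNat : Nat)) : Int) = (j0 : Int) + d.2 :=
          Int.toNat_of_nonneg hJ.1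
        set b : Nat := ((j0 : Int) + d.2).toNat with hbdef
        have hblen : b < data[a].length := by omega
        refine Eq.trans (pv_enum_sum_single data[a] 0
          (fun q => if q.2 = num ∧ (0 + (a : Int), data[a]).1 = (i0 : Int) + d.1 ∧ q.1 = (j0 : Int) + d.2 then 1 else 0)
          b hblen ?_) ?_
        · intro m hm hne
          exact if_neg (by rintro ⟨-, -, hB⟩; simp only [zero_add] at hB; omega)
        · have hval : PySem.List.pyGetD (PySem.List.pyGetD data ((i0 : Int) + d.1) []) ((j0 : Int) + d.2) 0 = data[a][b] := by
            rw [hrow, ← hbJ, PySem.List.pyGetD_natCast, List.getD_eq_getElem data[a] 0 hblen]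
          by_cases hv : data[a][b] = num
          · rw [if_pos ⟨hv, by simp only [zero_add]; omega, by simp only [zero_add]; omega⟩, if_pos ?_]
            exact ⟨⟨hI.1, hI.2, hJ.1, by rw [hrow]; exact hJ.2⟩, by rw [hval]; exact hv⟩
          · rw [if_neg (by rintro ⟨hvv, -, -⟩; exact hv hvv), if_neg ?_]
            rintro ⟨-, hvv⟩
            rw [hval] at hvv
            exact hv hvv
      · rw [pv_enum_sum_zero data[a] 0 _ ?_, if_neg ?_]
        · rintro ⟨⟨-, -, hc, hd⟩, -⟩
          rw [hrow] at hd
          exact hJ ⟨hc, hd⟩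
        · intro q hq
          rcases (PySem.List.mem_enumerate_iff data[a] 0 q).mp hq with ⟨m, hm, rfl⟩
          rw [if_neg]
          rintro ⟨-, -, hB⟩
          simp only [zero_add] at hB
          omega
  · rw [pv_enum_sum_zero data 0 _ ?_, if_neg ?_]
    · rintro ⟨⟨ha, hb, -, -⟩, -⟩
      exact hI ⟨ha, hb⟩
    · intro p hp
      rcases (PySem.List.mem_enumerate_iff data 0 p).mp hp with ⟨m, hm, rfl⟩
      refine pv_enum_sum_zero _ _ _ ?_
      intro q hq
      rw [if_neg]
      rintro ⟨-, hA, -⟩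
      simp only [zero_add] at hA
      omega

lemma pv_count_targets (data : List (List Int)) (num : Int) (dirs : List (Int × Int))
    (i0 j0 : Nat) (h1 : i0 < data.length) (h2 : j0 < data[i0].length) :
    (pvTargets data num dirs).count ((i0 : Int), (j0 : Int)) =
      dirs.countP (fun d => decide (pvOk data num i0 j0 d)) := by
  have hinbt : pvInb data (i0 : Int) (j0 : Int) := by
    refine ⟨by omega, by exact_mod_cast h1, by omega, ?_⟩
    rw [PySem.List.pyGetD_natCast, List.getD_eq_getElem data [] h1]
    exact_mod_cast h2
  have key : ∀ (ds : List (Int × Int)),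
      ((PySem.List.enumerate data).map (fun p =>
        ((PySem.List.enumerate p.2).map (fun q =>
          if q.2 = num then ds.countP (fun d => decide (p.1 = (i0 : Int) + d.1 ∧ q.1 = (j0 : Int) + d.2)) else 0)).sum)).sum
      = ds.countP (fun d => decide (pvOk data num (i0 : Int) (j0 : Int) d)) := by
    intro ds
    induction ds with
    | nil => simp
    | cons d rest ih =>
      simp only [List.countP_cons]
      have hsplit : ∀ (p : Int × List Int) (q : Int × Int),
          (if q.2 = num then rest.countP (fun d => decide (p.1 = (i0 : Int) + d.1 ∧ q.1 = (j0 : Int) + d.2)) + (if decide (p.1 = (i0 : Int) + d.1 ∧ q.1 = (j0 : Int) + d.2) then 1 else 0) else 0)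
          = (if q.2 = num then rest.countP (fun d => decide (p.1 = (i0 : Int) + d.1 ∧ q.1 = (j0 : Int) + d.2)) else 0)
            + (if q.2 = num ∧ p.1 = (i0 : Int) + d.1 ∧ q.1 = (j0 : Int) + d.2 then 1 else 0) := by
        intro p q
        by_cases hq : q.2 = num <;> by_cases hd : p.1 = (i0 : Int) + d.1 ∧ q.1 = (j0 : Int) + d.2 <;>
          simp [hq, hd]
      simp only [hsplit, List.sum_map_add]
      rw [ih, pv_T data num i0 j0 d]
      simp only [decide_eq_true_eq]
  rw [pvTargets, List.count_flatMap]
  simp only [Function.comp_def]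
  have hfun : (fun p : Int × List Int => List.count ((i0 : Int), (j0 : Int))
      ((PySem.List.enumerate p.2).flatMap (fun q =>
        if q.2 = num then
          (dirs.filter (fun d => decide (pvInb data (p.1 - d.1) (q.1 - d.2)))).map
            (fun d => (p.1 - d.1, q.1 - d.2))
        else [])))
      = (fun p : Int × List Int =>
        ((PySem.List.enumerate p.2).map (fun q =>
          if q.2 = num then dirs.countP (fun d => decide (p.1 = (i0 : Int) + d.1 ∧ q.1 = (j0 : Int) + d.2)) else 0)).sum) := by
    funext p
    rw [List.count_flatMap]
    simp only [Function.comp_def]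
    congr 1
    apply List.map_congr_left
    intro q _
    by_cases hq : q.2 = num
    · simp only [if_pos hq]
      have hcm : ∀ (m : List (Int × Int)),
          List.count ((i0 : Int), (j0 : Int)) (m.map (fun d => (p.1 - d.1, q.1 - d.2)))
          = m.countP (fun d => (p.1 - d.1, q.1 - d.2) == ((i0 : Int), (j0 : Int))) := by
        intro m
        simp [List.count, List.countP_map]
        rfl
      rw [hcm, List.countP_filter]
      apply List.countP_congr
      intro d _
      by_cases hc : p.1 = (i0 : Int) + d.1 ∧ q.1 = (j0 : Int) + d.2
      · have e1 : p.1 - d.1 = (i0 : Int) := by omega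
        have e2 : q.1 - d.2 = (j0 : Int) := by omega
        simp [hc]
        exact ⟨h1, by rw [List.getElem?_eq_getElem h1]; simpa using h2⟩
      · have hne : ¬ ((p.1 - d.1, q.1 - d.2) = ((i0 : Int), (j0 : Int))) := by
          simp only [Prod.mk.injEq]
          intro h
          exact hc ⟨by omega, by omega⟩
        simp [hc, hne]
    · simp [hq]
  rw [hfun]
  exact key dirs

-- ===== VERDICT (by name: the statement is the Claim_ definition above) =====
theorem step_spec : Claim_equal_step := by
  intro data num dirs _
  show step data num dirs = step_alt data num dirs
  unfold step step_alt
  have hbody : ∀ (p : Int × List Int) (acc2 : List (Int × Int)) (q : Int × Int),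
      (if q.2 = 0 then acc2
       else if checkNeighbors data p.1 q.1 num dirs then acc2 ++ [(p.1, q.1)] else acc2)
      = (if q.2 ≠ 0 ∧ checkNeighbors data p.1 q.1 num dirs = true then acc2 ++ [(p.1, q.1)] else acc2) := by
    intro p acc2 q
    by_cases h0 : q.2 = 0 <;> by_cases hcn : checkNeighbors data p.1 q.1 num dirs <;> simp [h0, hcn]
  simp only [hbody, PySem.List.foldl_append_ite, PySem.List.foldl_append_eq_flatMap, List.nil_append]
  rw [pv_counts_eq_counter data num dirs]
  congr 1
  refine congrArg List.length (List.flatMap_congr ?_)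
  intro p hp
  rcases (PySem.List.mem_enumerate_iff data 0 p).mp hp with ⟨k, hk, rfl⟩
  congr 1
  apply List.filter_congr
  intro q hq
  rcases (PySem.List.mem_enumerate_iff data[k] 0 q).mp hq with ⟨m, hm, rfl⟩
  simp only [zero_add]
  refine decide_eq_decide.mpr ?_
  rw [PySem.Dict.getD_foldl_insert_add_one, pv_check_iff,
    pv_count_targets data num dirs k m hk hm]
  have hemp : (PySem.Dict.empty : PySem.Dict (Int × Int) Int).getD ((k : Int), (m : Int)) 0 = 0 := by
    simp [pysem]
  rw [hemp, zero_add]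
  constructor
  · rintro ⟨h0, hall⟩
    refine ⟨h0, ?_⟩
    have hlen : List.countP (fun d => decide (pvOk data num (k : Int) (m : Int) d)) dirs = dirs.length :=
      List.countP_eq_length.mpr (fun d hd => decide_eq_true (hall d hd))
    exact_mod_cast hlen
  · rintro ⟨h0, hcnt⟩
    refine ⟨h0, fun d hd => ?_⟩
    have hnat : List.countP (fun d => decide (pvOk data num (k : Int) (m : Int) d)) dirs = dirs.length := by
      exact_mod_cast hcnt
    exact of_decide_eq_true (List.countP_eq_length.mp hnat d hd)
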